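-- pv_equiv track=rewrite | github.com/isavita/advent_generated | training_data/reflection-tuning/day20_part1_2018.py | parse_regex
-- ===== SOURCE A (Python) =====
-- from collections import defaultdict, deque
--
-- def parse_regex(regex):
--     graph = defaultdict(set)
--     stack = [(0, 0)]
--     pos = (0, 0)
--
--     for char in regex[1:-1]:  # Skip ^ and $
--         if char == '(':
--             stack.append(pos)
--         elif char == ')':
--             stack.pop()
--         elif char == '|':
--             pos = stack[-1]
--         else:
--             new_pos = pos
--             if char == 'N':
--                 new_pos = (pos[0], pos[1] + 1)
--             elif char == 'S':
--                 new_pos = (pos[0], pos[1] - 1)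
--             elif char == 'E':
--                 new_pos = (pos[0] + 1, pos[1])
--             elif char == 'W':
--                 new_pos = (pos[0] - 1, pos[1])
--
--             graph[pos].add(new_pos)
--             graph[new_pos].add(pos)
--             pos = new_pos
--
--     return graph
-- ===== SOURCE B (Python) =====
-- from collections import defaultdict
--
-- MOVES = {'N': (0, 1), 'S': (0, -1), 'E': (1, 0), 'W': (-1, 0)}
--
-- def parse_regex(regex):
--     graph = defaultdict(set)
--     body = regex[1:-1]  # skip ^ and $
--
--     def walk(i, pos):
--         # parse from index i until an unmatched ')' or end of body;
--         # '|' resets pos to the position this call started at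
--         start = pos
--         while i < len(body):
--             c = body[i]
--             if c == ')':
--                 return i + 1, pos
--             if c == '(':
--                 i, pos = walk(i + 1, pos)
--             elif c == '|':
--                 pos = start
--                 i += 1
--             else:
--                 dx, dy = MOVES.get(c, (0, 0))
--                 new_pos = (pos[0] + dx, pos[1] + dy)
--                 graph[pos].add(new_pos)
--                 graph[new_pos].add(pos)
--                 pos = new_pos
--                 i += 1
--         return i, pos
--
--     i, pos = 0, (0, 0)
--     while i < len(body):
--         i, pos = walk(i, pos)
--     return graph
-- ===== Notes on version B (the rewrite author's own statement) =====
-- stated objective: alternative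
-- what changed: Replaces A's single loop with an explicit saved-position stack by a recursive-descent parser: each walk() call remembers its own start position on the call stack, '|' resets to it, an unmatched ')' returns to the caller, and a top-level loop resumes after stray ')' just as A's pop of the initial stack entry does.
import Mathlib
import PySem

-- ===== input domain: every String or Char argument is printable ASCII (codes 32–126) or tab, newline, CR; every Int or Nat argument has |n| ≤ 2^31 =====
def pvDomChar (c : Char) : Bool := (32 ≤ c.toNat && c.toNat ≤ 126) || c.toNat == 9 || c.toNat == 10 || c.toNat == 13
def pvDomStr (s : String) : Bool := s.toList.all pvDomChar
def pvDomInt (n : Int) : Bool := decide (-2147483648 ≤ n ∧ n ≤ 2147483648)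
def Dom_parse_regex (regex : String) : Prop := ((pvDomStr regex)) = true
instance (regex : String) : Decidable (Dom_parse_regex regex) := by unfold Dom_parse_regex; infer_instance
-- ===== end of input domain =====

-- B replaces A's explicit saved-position stack by a recursive-descent parser (alternative
-- decomposition, same cost); equivalence of the returned graph is proved on Pre_ below.

abbrev Gph : Type := PySem.Dict (Int × Int) (PySem.Set (Int × Int))

-- ===== PORT A =====
def addEdgeA (g : Gph) (p q : Int × Int) : Gph :=
  g.insert p ((g.getD p PySem.Set.empty).add q)

def newPosA (c : Char) (pos : Int × Int) : Int × Int :=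
  if c = 'N' then (pos.1, pos.2 + 1)
  else if c = 'S' then (pos.1, pos.2 - 1)
  else if c = 'E' then (pos.1 + 1, pos.2)
  else if c = 'W' then (pos.1 - 1, pos.2)
  else pos

-- one loop iteration of A; `none` = the IndexError Python raises on an exhausted stack
def stepA (st : Option (Gph × List (Int × Int) × (Int × Int))) (c : Char) :
    Option (Gph × List (Int × Int) × (Int × Int)) :=
  match st with
  | none => none
  | some (g, stack, pos) =>
    if c = '(' then some (g, pos :: stack, pos)
    else if c = ')' then
      match stack with
      | [] => none
      | _ :: t => some (g, t, pos)
    else if c = '|' then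
      match stack with
      | [] => none
      | top :: rest => some (g, top :: rest, top)
    else
      let np := newPosA c pos
      some (addEdgeA (addEdgeA g pos np) np pos, stack, np)

def parse_regex (regex : String) : List (Int × Int × List (Int × Int)) :=
  match (PySem.Str.slice regex (some 1) (some (-1))).toList.foldl stepA
      (some (PySem.Dict.empty, [(((0:Int), (0:Int)) : Int × Int)], (((0:Int), (0:Int)) : Int × Int))) with
  | some (g, _, _) => g.items.map (fun kv => (kv.1.1, kv.1.2, kv.2))
  | none => []

-- ===== PORT B =====
def pvMoves : PySem.Dict Char (Int × Int) :=
  PySem.Dict.ofList [('N', ((0:Int), (1:Int))), ('S', (0, -1)), ('E', (1, 0)), ('W', (-1, 0))]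

def addEdgeB (g : Gph) (p q : Int × Int) : Gph :=
  g.insert p ((g.getD p PySem.Set.empty).add q)

-- recursive-descent `walk`: parse until an unmatched ')' (returned rest = input after it) or
-- the end of the input; the fuel only guards totality and is never exhausted when fuel > length
def walkB (fuel : Nat) (g : Gph) (start pos : Int × Int) (l : List Char) :
    Gph × (Int × Int) × List Char :=
  match fuel, l with
  | _, [] => (g, pos, [])
  | 0, l => (g, pos, l)
  | fuel + 1, c :: cs =>
    if c = ')' then (g, pos, cs)
    else if c = '(' then
      let r := walkB fuel g pos pos cs
      walkB fuel r.1 start r.2.1 r.2.2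
    else if c = '|' then walkB fuel g start start cs
    else
      let d := pvMoves.getD c (0, 0)
      let np := (pos.1 + d.1, pos.2 + d.2)
      walkB fuel (addEdgeB (addEdgeB g pos np) np pos) start np cs

-- the top-level `while i < len(body)` loop of B
def topB (fuel : Nat) (g : Gph) (pos : Int × Int) (l : List Char) : Gph :=
  match fuel with
  | 0 => g
  | fuel + 1 =>
    match l with
    | [] => g
    | _ :: _ =>
      let r := walkB (l.length + 1) g pos pos l
      topB fuel r.1 r.2.1 r.2.2

def parse_regex_alt (regex : String) : List (Int × Int × List (Int × Int)) :=
  let body := (PySem.Str.slice regex (some 1) (some (-1))).toList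
  (topB (body.length + 1) PySem.Dict.empty ((0:Int), (0:Int)) body).items.map
    (fun kv => (kv.1.1, kv.1.2, kv.2))

-- ===== PRECONDITION & SPEC =====
-- k simulates A's stack SIZE (initially 1): false exactly when A pops/peeks an empty stack
def preOkA : Nat → List Char → Bool
  | _, [] => true
  | k, c :: cs =>
    if c = '(' then preOkA (k + 1) cs
    else if c = ')' then decide (1 ≤ k) && preOkA (k - 1) cs
    else if c = '|' then decide (1 ≤ k) && preOkA k cs
    else preOkA k cs

-- Pre_ excludes exactly the inputs on which A raises IndexError (pop or peek of the empty stack)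
def Pre_parse_regex (regex : String) : Prop :=
  preOkA 1 (PySem.Str.slice regex (some 1) (some (-1))).toList = true

instance (regex : String) : Decidable (Pre_parse_regex regex) := by
  unfold Pre_parse_regex; infer_instance

def pvWitness_parse_regex : String := "^N(E|W)S$"

def Spec_parse_regex (regex : String) (out : List (Int × Int × List (Int × Int))) : Prop :=
  out = parse_regex_alt regex
instance (regex : String) (out : List (Int × Int × List (Int × Int))) :
    Decidable (Spec_parse_regex regex out) := by unfold Spec_parse_regex; infer_instance

-- ===== CLAIM (what is proved, stated in full; the proofs are below) =====
def Claim_equal_parse_regex : Prop :=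
  ∀ (regex : String), Dom_parse_regex regex → Pre_parse_regex regex →
    Spec_parse_regex regex (parse_regex regex)

-- ===== LEMMAS AND PROOFS =====

lemma foldl_stepA_none (l : List Char) : l.foldl stepA none = none := by
  induction l with
  | nil => rfl
  | cons c cs ih => simpa [List.foldl, stepA] using ih

lemma pvMoves_eq :
    pvMoves = PySem.Dict.mk [('N', (0, 1)), ('S', (0, -1)), ('E', (1, 0)), ('W', (-1, 0))] := by
  decide

lemma newPosA_eq (c : Char) (pos : Int × Int) :
    newPosA c pos = (pos.1 + (pvMoves.getD c (0, 0)).1, pos.2 + (pvMoves.getD c (0, 0)).2) := by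
  by_cases h1 : c = 'N'
  · subst h1
    have h : pvMoves.getD 'N' (0, 0) = (0, 1) := by decide
    simp [newPosA, h]
  by_cases h2 : c = 'S'
  · subst h2
    have h : pvMoves.getD 'S' (0, 0) = (0, -1) := by decide
    simp [newPosA, h, sub_eq_add_neg]
  by_cases h3 : c = 'E'
  · subst h3
    have h : pvMoves.getD 'E' (0, 0) = (1, 0) := by decide
    simp [newPosA, h]
  by_cases h4 : c = 'W'
  · subst h4
    have h : pvMoves.getD 'W' (0, 0) = (-1, 0) := by decide
    simp [newPosA, h, sub_eq_add_neg]
  have h : pvMoves.getD c (0, 0) = (0, 0) := by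
    simp [pvMoves_eq, PySem.Dict.getD, PySem.Dict.get?,
      Ne.symm h1, Ne.symm h2, Ne.symm h3, Ne.symm h4]
  simp [newPosA, h, h1, h2, h3, h4]

lemma addEdge_eq : addEdgeB = addEdgeA := rfl

-- A runs without raising as long as preOkA approves (stack size is tracked exactly)
lemma pre_some : ∀ (l : List Char) (stack : List (Int × Int)) (g : Gph) (pos : Int × Int),
    preOkA stack.length l = true →
    ∃ g' stk' pos', l.foldl stepA (some (g, stack, pos)) = some (g', stk', pos') := by
  intro l
  induction l with
  | nil => exact fun stack g pos _ => ⟨g, stack, pos, rfl⟩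
  | cons c cs ih =>
    intro stack g pos h
    by_cases h1 : c = '('
    · subst h1
      simp only [preOkA] at h
      have := ih (pos :: stack) g pos (by simpa using h)
      simpa [List.foldl, stepA] using this
    by_cases h2 : c = ')'
    · subst h2
      cases stack with
      | nil => simp [preOkA] at h
      | cons s t =>
        simp only [preOkA, if_neg (by decide : ¬')' = '(')] at h
        have := ih t g pos (by simpa using h)
        simpa [List.foldl, stepA] using this
    by_cases h3 : c = '|'
    · subst h3
      cases stack with
      | nil => simp [preOkA] at h
      | cons s t =>
        simp only [preOkA, if_neg (by decide : ¬'|' = '('),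
          if_neg (by decide : ¬'|' = ')')] at h
        have := ih (s :: t) g s (by simpa using h)
        simpa [List.foldl, stepA] using this
    · simp only [preOkA, if_neg h1, if_neg h2, if_neg h3] at h
      have := ih stack (addEdgeA (addEdgeA g pos (newPosA c pos)) (newPosA c pos) pos)
        (newPosA c pos) h
      simpa [List.foldl, stepA, h1, h2, h3] using this

-- simulation of one walkB call against A's fold, with A's stack = start :: tail
lemma walk_sim : ∀ (fuel : Nat) (l : List Char), l.length < fuel →
    ∀ (g : Gph) (start : Int × Int) (tail : List (Int × Int)) (pos : Int × Int),
    (∃ pre g' pos' rest, walkB fuel g start pos l = (g', pos', rest) ∧ l = pre ++ ')' :: rest ∧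
        (pre ++ [')']).foldl stepA (some (g, start :: tail, pos)) = some (g', tail, pos'))
    ∨ (∃ g' pos' ext, walkB fuel g start pos l = (g', pos', []) ∧
        l.foldl stepA (some (g, start :: tail, pos)) = some (g', ext ++ start :: tail, pos')) := by
  intro fuel
  induction fuel with
  | zero => intro l hl; simp at hl
  | succ fuel ih =>
    intro l hl g start tail pos
    cases l with
    | nil =>
      right
      exact ⟨g, pos, [], by simp [walkB], by simp⟩
    | cons c cs =>
      have hcs : cs.length < fuel := by simpa using hl
      by_cases hr : c = ')'
      · subst hr
        left
        refine ⟨[], g, pos, cs, by simp [walkB], rfl, ?_⟩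
        simp [List.foldl, stepA]
      by_cases ho : c = '('
      · subst ho
        have hw0 : walkB (fuel + 1) g start pos ('(' :: cs) =
            walkB fuel (walkB fuel g pos pos cs).1 start
              (walkB fuel g pos pos cs).2.1 (walkB fuel g pos pos cs).2.2 := by
          simp [walkB]
        have hstep : stepA (some (g, start :: tail, pos)) '(' =
            some (g, pos :: start :: tail, pos) := by simp [stepA]
        rcases ih cs hcs g pos (start :: tail) pos with
          ⟨pre1, g1, pos1, rest1, hw1, hsplit1, hf1⟩ | ⟨g1, pos1, ext1, hw1, hf1⟩
        · have hrest1 : rest1.length < fuel := by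
            have := congrArg List.length hsplit1
            simp at this; omega
          rcases ih rest1 hrest1 g1 start tail pos1 with
            ⟨pre2, g2, pos2, rest2, hw2, hsplit2, hf2⟩ | ⟨g2, pos2, ext2, hw2, hf2⟩
          · left
            refine ⟨'(' :: (pre1 ++ ')' :: pre2), g2, pos2, rest2, ?_, ?_, ?_⟩
            · rw [hw0, hw1]; exact hw2
            · rw [hsplit1, hsplit2]; simp
            · have hsh : ('(' :: (pre1 ++ ')' :: pre2)) ++ [')'] =
                  '(' :: ((pre1 ++ [')']) ++ (pre2 ++ [')'])) := by simp
              rw [hsh]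
              simp only [List.foldl_cons, hstep, List.foldl_append, hf1, hf2]
          · right
            refine ⟨g2, pos2, ext2, ?_, ?_⟩
            · rw [hw0, hw1]; exact hw2
            · have hsh : '(' :: cs = '(' :: ((pre1 ++ [')']) ++ rest1) := by
                rw [hsplit1]; simp
              rw [hsh]
              simp only [List.foldl_cons, hstep, List.foldl_append, hf1, hf2]
        · right
          refine ⟨g1, pos1, ext1 ++ [pos], ?_, ?_⟩
          · rw [hw0, hw1]; simp [walkB]
          · simp only [List.foldl_cons, hstep, hf1]
            simp
      by_cases hb : c = '|'
      · subst hb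
        have hw0 : walkB (fuel + 1) g start pos ('|' :: cs) = walkB fuel g start start cs := by
          simp [walkB]
        have hstep : stepA (some (g, start :: tail, pos)) '|' =
            some (g, start :: tail, start) := by simp [stepA]
        rcases ih cs hcs g start tail start with
          ⟨pre1, g1, pos1, rest1, hw1, hsplit1, hf1⟩ | ⟨g1, pos1, ext1, hw1, hf1⟩
        · left
          refine ⟨'|' :: pre1, g1, pos1, rest1, by rw [hw0]; exact hw1, by rw [hsplit1]; simp, ?_⟩
          simp only [List.cons_append, List.foldl_cons, hstep, hf1]
        · right
          exact ⟨g1, pos1, ext1, by rw [hw0]; exact hw1,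
            by simp only [List.foldl_cons, hstep, hf1]⟩
      · -- a direction (or inert) character
        have hstep : stepA (some (g, start :: tail, pos)) c =
            some (addEdgeA (addEdgeA g pos (newPosA c pos)) (newPosA c pos) pos,
              start :: tail, newPosA c pos) := by
          simp [stepA, ho, hr, hb]
        have hw0 : walkB (fuel + 1) g start pos (c :: cs) =
            walkB fuel (addEdgeA (addEdgeA g pos (newPosA c pos)) (newPosA c pos) pos)
              start (newPosA c pos) cs := by
          simp only [walkB, if_neg hr, if_neg ho, if_neg hb]
          rw [addEdge_eq, ← newPosA_eq]
        rcases ih cs hcs (addEdgeA (addEdgeA g pos (newPosA c pos)) (newPosA c pos) pos)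
            start tail (newPosA c pos) with
          ⟨pre1, g1, pos1, rest1, hw1, hsplit1, hf1⟩ | ⟨g1, pos1, ext1, hw1, hf1⟩
        · left
          refine ⟨c :: pre1, g1, pos1, rest1, by rw [hw0]; exact hw1, by rw [hsplit1]; simp, ?_⟩
          simp only [List.cons_append, List.foldl_cons, hstep, hf1]
        · right
          exact ⟨g1, pos1, ext1, by rw [hw0]; exact hw1,
            by simp only [List.foldl_cons, hstep, hf1]⟩

-- simulation when A's stack is empty (B's top-level resumed walk)
lemma walk_empty_sim : ∀ (fuel : Nat) (l : List Char), l.length < fuel →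
    ∀ (g : Gph) (pos start : Int × Int) (g₂ : Gph) (stk₂ : List (Int × Int)) (pos₂ : Int × Int),
    l.foldl stepA (some (g, ([] : List (Int × Int)), pos)) = some (g₂, stk₂, pos₂) →
    walkB fuel g start pos l = (g₂, pos₂, []) := by
  intro fuel
  induction fuel with
  | zero => intro l hl; simp at hl
  | succ fuel ih =>
    intro l hl g pos start g₂ stk₂ pos₂ hf
    cases l with
    | nil =>
      simp only [List.foldl_nil, Option.some.injEq, Prod.mk.injEq] at hf
      obtain ⟨h1, _, h3⟩ := hf
      simp [walkB, h1, h3]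
    | cons c cs =>
      have hcs : cs.length < fuel := by simpa using hl
      by_cases hr : c = ')'
      · subst hr
        rw [List.foldl_cons, show stepA (some (g, [], pos)) ')' = none by simp [stepA],
          foldl_stepA_none] at hf
        exact absurd hf (by simp)
      by_cases ho : c = '('
      · subst ho
        rw [List.foldl_cons, show stepA (some (g, [], pos)) '(' =
          some (g, [pos], pos) by simp [stepA]] at hf
        have hw0 : walkB (fuel + 1) g start pos ('(' :: cs) =
            walkB fuel (walkB fuel g pos pos cs).1 start
              (walkB fuel g pos pos cs).2.1 (walkB fuel g pos pos cs).2.2 := by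
          simp [walkB]
        rcases walk_sim fuel cs hcs g pos [] pos with
          ⟨pre1, g1, pos1, rest1, hw1, hsplit1, hf1⟩ | ⟨g1, pos1, ext1, hw1, hf1⟩
        · have hrest1 : rest1.length < fuel := by
            have := congrArg List.length hsplit1
            simp at this; omega
          rw [hsplit1, show pre1 ++ ')' :: rest1 = (pre1 ++ [')']) ++ rest1 by simp,
            List.foldl_append, hf1] at hf
          rw [hw0, hw1]
          exact ih rest1 hrest1 g1 pos1 start g₂ stk₂ pos₂ hf
        · rw [hf1] at hf
          simp only [Option.some.injEq, Prod.mk.injEq] at hf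
          obtain ⟨h1, _, h3⟩ := hf
          rw [hw0, hw1]
          simp [walkB, h1, h3]
      by_cases hb : c = '|'
      · subst hb
        rw [List.foldl_cons, show stepA (some (g, [], pos)) '|' = none by simp [stepA],
          foldl_stepA_none] at hf
        exact absurd hf (by simp)
      · rw [List.foldl_cons, show stepA (some (g, [], pos)) c =
          some (addEdgeA (addEdgeA g pos (newPosA c pos)) (newPosA c pos) pos, [],
            newPosA c pos) by simp [stepA, ho, hr, hb]] at hf
        have hw0 : walkB (fuel + 1) g start pos (c :: cs) =
            walkB fuel (addEdgeA (addEdgeA g pos (newPosA c pos)) (newPosA c pos) pos)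
              start (newPosA c pos) cs := by
          simp only [walkB, if_neg hr, if_neg ho, if_neg hb]
          rw [addEdge_eq, ← newPosA_eq]
        rw [hw0]
        exact ih cs hcs _ _ start g₂ stk₂ pos₂ hf

lemma topB_nil (fuel : Nat) (g : Gph) (pos : Int × Int) : topB fuel g pos [] = g := by
  cases fuel <;> simp [topB]

-- the two sides compute the same final graph
lemma top_eq (body : List Char) (g' : Gph) (stk' : List (Int × Int)) (pos' : Int × Int)
    (hfold : body.foldl stepA
        (some (PySem.Dict.empty, [(((0:Int), (0:Int)) : Int × Int)], (((0:Int), (0:Int)) : Int × Int)))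
      = some (g', stk', pos')) :
    topB (body.length + 1) PySem.Dict.empty ((0:Int), (0:Int)) body = g' := by
  cases body with
  | nil =>
    simp only [List.foldl_nil, Option.some.injEq, Prod.mk.injEq] at hfold
    simp [topB_nil, hfold.1]
  | cons c cs =>
    have hstep1 : topB ((c :: cs).length + 1) PySem.Dict.empty ((0:Int), (0:Int)) (c :: cs) =
        topB ((c :: cs).length)
          (walkB ((c :: cs).length + 1) PySem.Dict.empty ((0,0)) ((0,0)) (c :: cs)).1
          (walkB ((c :: cs).length + 1) PySem.Dict.empty ((0,0)) ((0,0)) (c :: cs)).2.1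
          (walkB ((c :: cs).length + 1) PySem.Dict.empty ((0,0)) ((0,0)) (c :: cs)).2.2 := by
      simp [topB]
    rcases walk_sim ((c :: cs).length + 1) (c :: cs) (by omega) PySem.Dict.empty
        ((0,0)) [] ((0,0)) with
      ⟨pre1, g1, pos1, rest1, hw1, hsplit1, hf1⟩ | ⟨g1, pos1, ext1, hw1, hf1⟩
    · rw [hsplit1, show pre1 ++ ')' :: rest1 = (pre1 ++ [')']) ++ rest1 by simp,
        List.foldl_append, hf1] at hfold
      rw [hstep1, hw1]
      cases rest1 with
      | nil =>
        simp only [List.foldl_nil, Option.some.injEq, Prod.mk.injEq] at hfold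
        rw [topB_nil]
        exact hfold.1
      | cons x xs =>
        have hge : 2 ≤ (c :: cs).length := by
          rw [hsplit1]; simp; omega
        obtain ⟨m, hm⟩ : ∃ m, (c :: cs).length = m + 1 + 1 :=
          ⟨(c :: cs).length - 2, by omega⟩
        rw [hm]
        have hw2 := walk_empty_sim ((x :: xs).length + 1) (x :: xs) (by omega)
          g1 pos1 pos1 g' stk' pos' hfold
        have : topB (m + 1 + 1) g1 pos1 (x :: xs) =
            topB (m + 1)
              (walkB ((x :: xs).length + 1) g1 pos1 pos1 (x :: xs)).1
              (walkB ((x :: xs).length + 1) g1 pos1 pos1 (x :: xs)).2.1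
              (walkB ((x :: xs).length + 1) g1 pos1 pos1 (x :: xs)).2.2 := by
          simp [topB]
        rw [this, hw2, topB_nil]
    · rw [hf1] at hfold
      simp only [Option.some.injEq, Prod.mk.injEq] at hfold
      rw [hstep1, hw1]
      simp only [List.length_cons]
      rw [topB_nil]
      exact hfold.1

-- ===== VERDICT (by name: the statement is the Claim_ definition above) =====
theorem parse_regex_spec : Claim_equal_parse_regex := by
  intro regex hdom hpre
  unfold Spec_parse_regex parse_regex parse_regex_alt
  obtain ⟨g', stk', pos', hfold⟩ :=
    pre_some (PySem.Str.slice regex (some 1) (some (-1))).toList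
      [(((0:Int), (0:Int)) : Int × Int)] PySem.Dict.empty ((0:Int), (0:Int))
      (by simpa [Pre_parse_regex] using hpre)
  rw [hfold]
  show List.map (fun kv => (kv.1.1, kv.1.2, kv.2)) g'.items =
    List.map (fun kv => (kv.1.1, kv.1.2, kv.2))
      (topB ((PySem.Str.slice regex (some 1) (some (-1))).toList.length + 1)
        PySem.Dict.empty ((0:Int), (0:Int))
        (PySem.Str.slice regex (some 1) (some (-1))).toList).items
  rw [top_eq _ _ _ _ hfold]
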